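-- pv_equiv track=rewrite | github.com/metadriverse/metaurban | metaurban/orca_algo/convert_mask/convert_vertex.py | find_corner
-- ===== SOURCE A (Python) =====
-- def find_corner(regions):
--     corners = []
--     for region in regions:
--         minx = min(vertex[0] for vertex in region)
--         miny = min(vertex[1] for vertex in region)
--         maxx = max(vertex[0] for vertex in region)
--         maxy = max(vertex[1] for vertex in region)
--         corners.append([(minx,miny),(maxx+1,miny),(maxx+1,maxy+1),(minx, maxy+1)])
--     return corners
-- ===== SOURCE B (Python) =====
-- def find_corner(regions):
--     # Recursive decomposition; per region: sort each coordinate list once and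
--     # read the extremes off its ends, instead of running min/max reductions.
--     if not regions:
--         return []
--     region = regions[0]
--     xs = sorted(v[0] for v in region)
--     ys = sorted(v[1] for v in region)
--     quad = [(xs[0], ys[0]), (xs[-1] + 1, ys[0]),
--             (xs[-1] + 1, ys[-1] + 1), (xs[0], ys[-1] + 1)]
--     return [quad] + find_corner(regions[1:])
-- ===== Notes on version B (the rewrite author's own statement) =====
-- stated objective: alternative
-- what changed: Replaces the per-region min/max reductions by sorting each coordinate list once and reading the extremes off the sorted ends, and replaces the accumulating outer loop by structural recursion over the regions.
import Mathlib
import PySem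

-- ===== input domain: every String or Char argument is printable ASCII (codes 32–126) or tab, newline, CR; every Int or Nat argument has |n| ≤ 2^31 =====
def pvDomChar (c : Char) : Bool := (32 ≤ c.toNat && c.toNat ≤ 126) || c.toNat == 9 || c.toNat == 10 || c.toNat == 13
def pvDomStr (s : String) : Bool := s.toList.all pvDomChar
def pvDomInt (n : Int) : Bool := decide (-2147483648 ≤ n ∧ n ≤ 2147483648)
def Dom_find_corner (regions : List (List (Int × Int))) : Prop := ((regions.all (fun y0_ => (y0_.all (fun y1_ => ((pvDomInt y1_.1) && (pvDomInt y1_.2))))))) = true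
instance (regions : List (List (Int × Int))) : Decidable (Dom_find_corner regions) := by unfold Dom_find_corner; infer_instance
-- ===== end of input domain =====

-- B sorts each region's coordinate lists and reads the extremes off the ends, recursing over regions
-- instead of A's accumulating loop of four min/max reductions (alternative decomposition, not faster).
-- ===== PORT A =====
def find_corner (regions : List (List (Int × Int))) : List (List (Int × Int)) :=
  regions.foldl (fun corners region =>
    -- min()/max() on an empty region raise ValueError in Python; getD 0 is unreachable under Pre_
    let minx := (PySem.List.min? (region.map (fun v => v.1)) (fun x => x)).getD 0
    let miny := (PySem.List.min? (region.map (fun v => v.2)) (fun x => x)).getD 0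
    let maxx := (PySem.List.max? (region.map (fun v => v.1)) (fun x => x)).getD 0
    let maxy := (PySem.List.max? (region.map (fun v => v.2)) (fun x => x)).getD 0
    corners ++ [[(minx, miny), (maxx + 1, miny), (maxx + 1, maxy + 1), (minx, maxy + 1)]]) []

-- ===== PORT B =====
def find_corner_alt : List (List (Int × Int)) → List (List (Int × Int))
  | [] => []
  | region :: rest =>
    let xs := PySem.List.sorted (region.map (fun v => v.1)) (fun x => x) false
    let ys := PySem.List.sorted (region.map (fun v => v.2)) (fun x => x) false
    -- xs[0] / xs[-1] raise IndexError on an empty region; getD 0 is unreachable under Pre_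
    let minx := (PySem.List.pyGet? xs 0).getD 0
    let maxx := (PySem.List.pyGet? xs (-1)).getD 0
    let miny := (PySem.List.pyGet? ys 0).getD 0
    let maxy := (PySem.List.pyGet? ys (-1)).getD 0
    [(minx, miny), (maxx + 1, miny), (maxx + 1, maxy + 1), (minx, maxy + 1)] :: find_corner_alt rest

-- ===== PRECONDITION & SPEC =====
-- Pre_: every region is nonempty; A raises ValueError on an empty region (min() of empty sequence),
-- B raises IndexError there (xs[0]).
def Pre_find_corner (regions : List (List (Int × Int))) : Prop :=
  ∀ region ∈ regions, region ≠ []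
instance (regions : List (List (Int × Int))) : Decidable (Pre_find_corner regions) := by
  unfold Pre_find_corner; infer_instance
def pvWitness_find_corner : (List (List (Int × Int))) := [[(0, 1), (2, 0)], [(3, 3)]]
def Spec_find_corner (regions : List (List (Int × Int))) (out : List (List (Int × Int))) : Prop := out = find_corner_alt regions
instance (regions : List (List (Int × Int))) (out : List (List (Int × Int))) : Decidable (Spec_find_corner regions out) := by unfold Spec_find_corner; infer_instance

-- ===== CLAIM =====
def Claim_equal_find_corner : Prop := ∀ (regions : List (List (Int × Int))), Dom_find_corner regions → Pre_find_corner regions → Spec_find_corner regions (find_corner regions)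

-- ===== LEMMAS AND PROOFS =====
theorem sorted_head_eq_min (l : List Int) (h : l ≠ []) :
    (PySem.List.pyGet? (PySem.List.sorted l (fun x => x) false) 0).getD 0
      = (PySem.List.min? l (fun x => x)).getD 0 := by
  obtain ⟨x, t, rfl⟩ := List.exists_cons_of_ne_nil h
  have hsne : PySem.List.sorted (x :: t) (fun x => x) false ≠ [] := by
    rw [Ne, PySem.List.sorted_eq_nil_iff]; simp
  obtain ⟨m, t', hmt⟩ := List.exists_cons_of_ne_nil hsne
  have hmem : m ∈ (x :: t) :=
    (PySem.List.sorted_perm (xs := x :: t) (key := fun x => x) (rev := false)).mem_iff.mp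
      (by simp [hmt])
  have hmin : PySem.List.min? (x :: t) (fun x => x) = some (t.foldl min x) :=
    PySem.List.min?_id_cons ..
  have hm_le : ∀ y ∈ (x :: t), m ≤ y := fun y hy => PySem.List.key_head_sorted_le _ _ hmt y hy
  have heq : m = t.foldl min x :=
    le_antisymm (hm_le _ (PySem.List.min?_mem hmin)) (PySem.List.min?_isMin hmin m hmem)
  rw [hmt, hmin]
  simp [PySem.List.pyGet?, PySem.List.pyIdx?, heq]

theorem sorted_last_eq_max (l : List Int) (h : l ≠ []) :
    (PySem.List.pyGet? (PySem.List.sorted l (fun x => x) false) (-1)).getD 0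
      = (PySem.List.max? l (fun x => x)).getD 0 := by
  obtain ⟨x, t, rfl⟩ := List.exists_cons_of_ne_nil h
  have hsne : PySem.List.sorted (x :: t) (fun x => x) false ≠ [] := by
    rw [Ne, PySem.List.sorted_eq_nil_iff]; simp
  have hperm : (PySem.List.sorted (x :: t) (fun x => x) false).Perm (x :: t) :=
    PySem.List.sorted_perm ..
  have hmax : PySem.List.max? (x :: t) (fun x => x) = some (t.foldl max x) :=
    PySem.List.max?_id_cons ..
  have hmem : (PySem.List.sorted (x :: t) (fun x => x) false).getLast hsne ∈ (x :: t) :=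
    hperm.mem_iff.mp (List.getLast_mem hsne)
  have hm_ge : ∀ y ∈ (x :: t), y ≤ (PySem.List.sorted (x :: t) (fun x => x) false).getLast hsne := by
    intro y hy
    obtain ⟨p, hp, hyp⟩ := List.mem_iff_getElem.mp (hperm.mem_iff.mpr hy)
    have hlast := List.getLast_eq_getElem hsne
    have hmono := PySem.List.sorted_id_getElem_mono (xs := x :: t)
      (p := p) (q := (PySem.List.sorted (x :: t) (fun x => x) false).length - 1)
      (by omega) (by omega)
    rw [hlast, ← hyp]
    exact hmono
  have heq : (PySem.List.sorted (x :: t) (fun x => x) false).getLast hsne = t.foldl max x :=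
    le_antisymm (PySem.List.max?_isMax hmax _ hmem) (hm_ge _ (PySem.List.max?_mem hmax))
  rw [PySem.List.pyGet?_neg_one, hmax, List.getLast?_eq_some_getLast hsne, heq]

theorem fold_eq (t : List (List (Int × Int))) (ht : ∀ r ∈ t, r ≠ []) :
    ∀ acc : List (List (Int × Int)),
      t.foldl (fun corners region =>
        let minx := (PySem.List.min? (region.map (fun v => v.1)) (fun x => x)).getD 0
        let miny := (PySem.List.min? (region.map (fun v => v.2)) (fun x => x)).getD 0
        let maxx := (PySem.List.max? (region.map (fun v => v.1)) (fun x => x)).getD 0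
        let maxy := (PySem.List.max? (region.map (fun v => v.2)) (fun x => x)).getD 0
        corners ++ [[(minx, miny), (maxx + 1, miny), (maxx + 1, maxy + 1), (minx, maxy + 1)]]) acc
      = acc ++ find_corner_alt t := by
  induction t with
  | nil => intro acc; simp [find_corner_alt]
  | cons r t2 ih =>
    intro acc
    have hr : r ≠ [] := ht r (List.mem_cons_self ..)
    have hx : r.map (fun v => v.1) ≠ [] := by simpa using hr
    have hy : r.map (fun v => v.2) ≠ [] := by simpa using hr
    simp only [List.foldl_cons]
    rw [ih (fun x hx => ht x (List.mem_cons_of_mem _ hx))]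
    simp only [find_corner_alt,
      sorted_head_eq_min _ hx, sorted_last_eq_max _ hx,
      sorted_head_eq_min _ hy, sorted_last_eq_max _ hy]
    simp [List.append_assoc]

-- ===== VERDICT =====
theorem find_corner_spec : Claim_equal_find_corner := by
  intro regions _ hpre
  unfold Spec_find_corner find_corner
  simpa using fold_eq regions hpre []
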